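-- pv_equiv track=rewrite | github.com/honeyhyuni/algorithm | programmers_level1/OEIS.py | solution
-- ===== SOURCE A (Python) =====
-- def solution(nums):
--     answer = 0
--
--     for i in range(len(nums)):
--         for j in range(i + 1, len(nums)):
--             for k in range(j + 1, len(nums)):
--                 temp = nums[i] + nums[j] + nums[k]
--                 if temp > 2:
--                     for _ in range(2, temp // 2 + 1):
--                         if temp % _ == 0:
--                             break
--                     else:
--                         answer += 1
--
--     return answer
-- ===== SOURCE B (Python) =====
-- def solution(nums):
--     # Count 3-element index combinations whose sum is a prime (> 2, as in A).
--     def is_counted(n):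
--         if n <= 2 or n % 2 == 0:
--             return False
--         d = 3
--         while d * d <= n:
--             if n % d == 0:
--                 return False
--             d += 2
--         return True
--
--     def count(k, s, xs):
--         if k == 0:
--             return 1 if is_counted(s) else 0
--         total = 0
--         for i, x in enumerate(xs):
--             total += count(k - 1, s + x, xs[i + 1:])
--         return total
--
--     return count(3, 0, nums)
-- ===== Notes on version B (the rewrite author's own statement) =====
-- stated objective: faster
-- what changed: Replaced the triple index loops with a depth-3 recursive combination counter over list suffixes, and replaced trial division by every integer up to sum/2 with a parity check plus odd trial division up to sqrt(sum).
import Mathlib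
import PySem

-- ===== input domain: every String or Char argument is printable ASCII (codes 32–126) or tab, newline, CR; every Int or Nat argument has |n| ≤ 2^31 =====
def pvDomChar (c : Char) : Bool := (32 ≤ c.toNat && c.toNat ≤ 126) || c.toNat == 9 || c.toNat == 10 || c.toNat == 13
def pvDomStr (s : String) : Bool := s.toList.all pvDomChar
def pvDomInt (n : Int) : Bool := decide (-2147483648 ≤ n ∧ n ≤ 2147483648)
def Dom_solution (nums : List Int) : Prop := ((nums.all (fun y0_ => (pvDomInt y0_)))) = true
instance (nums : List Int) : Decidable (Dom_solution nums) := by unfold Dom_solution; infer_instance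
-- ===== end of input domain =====

-- B replaces A's triple index loops by a depth-3 recursive combination counter over suffixes,
-- and A's trial division by every integer up to temp//2 by a parity check plus odd trial
-- division up to the square root.

-- ===== PORT A =====
-- the inner 'for _ in range(2, temp//2+1): if temp % _ == 0: break / else:' loop,
-- iterated lazily exactly as Python's range-with-break: true iff a divisor is found
def findDiv (temp d hi : Int) : Bool :=
  if h : d < hi then
    (if PySem.Int.mod temp d == 0 then true else findDiv temp (d + 1) hi)
  else false
termination_by (hi - d).toNat

def solution (nums : List Int) : Int :=
  (PySem.List.pyRange 0 (nums.length : Int) 1).foldl (fun answer i =>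
    (PySem.List.pyRange (i + 1) (nums.length : Int) 1).foldl (fun answer j =>
      (PySem.List.pyRange (j + 1) (nums.length : Int) 1).foldl (fun answer k =>
        let temp := PySem.List.pyGetD nums i 0 + PySem.List.pyGetD nums j 0 +
          PySem.List.pyGetD nums k 0
        if temp > 2 then
          if findDiv temp 2 (PySem.Int.floordiv temp 2 + 1) then answer else answer + 1
        else answer) answer) answer) 0

-- ===== PORT B =====
-- while d*d <= n: if n % d == 0: return False; d += 2
def trialOdd (n d : Int) : Bool :=
  if h : d * d ≤ n then
    (if PySem.Int.mod n d == 0 then false else trialOdd n (d + 2))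
  else true
termination_by (n + 1 - d).toNat
decreasing_by
  have hdn : d ≤ n := by nlinarith
  omega

def isCounted (n : Int) : Bool :=
  if n ≤ 2 || PySem.Int.mod n 2 == 0 then false else trialOdd n 3

def countK : Nat → Int → List Int → Int
  | 0, s, _ => if isCounted s then 1 else 0
  | (k+1), s, xs =>
    (PySem.List.enumerate xs).foldl
      (fun total p => total + countK k (s + p.2) (PySem.List.slice xs (some (p.1 + 1)) none)) 0

def solution_alt (nums : List Int) : Int := countK 3 0 nums

-- ===== PRECONDITION & SPEC =====
def Spec_solution (nums : List Int) (out : Int) : Prop := out = solution_alt nums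
instance (nums : List Int) (out : Int) : Decidable (Spec_solution nums out) := by
  unfold Spec_solution; infer_instance

-- ===== CLAIM (what is proved, stated in full; the proofs are below) =====
def Claim_equal_solution : Prop := ∀ (nums : List Int), Dom_solution nums → Spec_solution nums (solution nums)

-- ===== LEMMAS AND PROOFS =====

-- A's inner for-else test, as a Boolean predicate on the sum
def acheckB (t : Int) : Bool :=
  decide (2 < t) && (PySem.List.pyRange 2 (PySem.Int.floordiv t 2 + 1) 1).all
    (fun d => !(PySem.Int.mod t d == 0))

def contrib (t : Int) : Int := if acheckB t then 1 else 0

lemma findDiv_eq (t : Int) :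
    ∀ (N : Nat) (d hi : Int), (hi - d).toNat ≤ N →
      findDiv t d hi = !(PySem.List.pyRange d hi 1).all (fun e => !(PySem.Int.mod t e == 0)) := by
  intro N
  induction N with
  | zero =>
    intro d hi hN
    have hge : hi ≤ d := by omega
    rw [findDiv, dif_neg (by omega), PySem.List.pyRange_one_eq_nil hge]
    rfl
  | succ n ih =>
    intro d hi hN
    by_cases hlt : d < hi
    · rw [findDiv, dif_pos hlt, PySem.List.pyRange_one_cons hlt, List.all_cons]
      cases hm : (PySem.Int.mod t d == 0)
      · rw [if_neg (by simp)]
        simp only [Bool.not_false, Bool.true_and]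
        exact ih (d + 1) hi (by omega)
      · rw [if_pos (by simp)]
        simp
    · rw [findDiv, dif_neg hlt, PySem.List.pyRange_one_eq_nil (by omega)]
      rfl

-- shared loop shape: one pass over the list, combining each element with its strict suffix
def S (F : Int → List Int → Int) : List Int → Int
  | [] => 0
  | x :: r => F x r + S F r

lemma S_congr (F G : Int → List Int → Int) (h : ∀ x r, F x r = G x r) :
    ∀ xs, S F xs = S G xs := by
  intro xs; induction xs with
  | nil => rfl
  | cons x r ih => simp [S, h, ih]

lemma sum_pyRange_suffix (nums : List Int) (F : Int → List Int → Int) :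
    ∀ (N : Nat) (a : Int), 0 ≤ a → ((nums.length : Int) - a).toNat ≤ N →
      ((PySem.List.pyRange a (nums.length : Int) 1).map
        (fun j => F (PySem.List.pyGetD nums j 0) (nums.drop (j.toNat + 1)))).sum
      = S F (nums.drop a.toNat) := by
  intro N
  induction N with
  | zero =>
    intro a ha hN
    have hge : (nums.length : Int) ≤ a := by omega
    rw [PySem.List.pyRange_one_eq_nil hge]
    rw [List.drop_eq_nil_of_le (by omega : nums.length ≤ a.toNat)]
    rfl
  | succ n ih =>
    intro a ha hN
    by_cases hlt : a < (nums.length : Int)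
    · rw [PySem.List.pyRange_one_cons hlt]
      have hidx : a.toNat < nums.length := by omega
      have hdrop : nums.drop a.toNat = nums[a.toNat] :: nums.drop (a.toNat + 1) :=
        List.drop_eq_getElem_cons hidx
      have hget : PySem.List.pyGetD nums a 0 = nums[a.toNat] :=
        PySem.List.pyGetD_eq_getElem nums 0 ha hlt
      have ha1 : (a + 1).toNat = a.toNat + 1 := by omega
      rw [List.map_cons, List.sum_cons, ih (a + 1) (by omega) (by omega), hdrop]
      simp [S, hget, ha1]
    · have hge : (nums.length : Int) ≤ a := by omega
      rw [PySem.List.pyRange_one_eq_nil hge]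
      rw [List.drop_eq_nil_of_le (by omega : nums.length ≤ a.toNat)]
      rfl

-- ===== number-theory core: the two primality tests agree =====

lemma trialOdd_iff (t : Int) :
    ∀ (N : Nat) (d : Int), (t + 1 - d).toNat ≤ N → 1 ≤ d →
      (trialOdd t d = true ↔
        ∀ k : Nat, (d + 2 * k) * (d + 2 * k) ≤ t → PySem.Int.mod t (d + 2 * k) ≠ 0) := by
  intro N
  induction N with
  | zero =>
    intro d hN hd
    have hdt : t < d := by omega
    have hgt : ¬ d * d ≤ t := by nlinarith
    rw [trialOdd, dif_neg hgt]
    simp only [true_iff]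
    intro k hk
    exfalso
    have h1 : d ≤ d + 2 * (k : Int) := by omega
    nlinarith
  | succ n ih =>
    intro d hN hd
    rw [trialOdd]
    by_cases hle : d * d ≤ t
    · rw [dif_pos hle]
      have hdt : d ≤ t := by nlinarith
      by_cases hm : PySem.Int.mod t d = 0
      · simp only [hm]
        simp only [BEq.rfl, if_true]
        constructor
        · intro h; exact absurd h (by simp)
        · intro h
          exfalso
          exact h 0 (by simpa using hle) (by simpa using hm)
      · have : (PySem.Int.mod t d == 0) = false := by simpa using hm
        rw [this]
        simp only [Bool.false_eq_true, if_false]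
        rw [ih (d + 2) (by omega) (by omega)]
        constructor
        · intro h k hk
          match k with
          | 0 => simpa using hm
          | (j+1) =>
            have := h j
            simp only at this ⊢
            push_cast at hk ⊢
            rw [show d + 2 * ((j:Int) + 1) = (d + 2) + 2 * j by ring] at hk ⊢
            exact this hk
        · intro h k hk
          have := h (k + 1)
          push_cast at this ⊢
          rw [show d + 2 + 2 * (k:Int) = d + 2 * (k + 1) by ring] at hk ⊢
          exact this hk
    · rw [dif_neg hle]
      simp only [true_iff]
      intro k hk
      exfalso
      have h1 : d ≤ d + 2 * (k : Int) := by omega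
      nlinarith

lemma divA_iff_prime (t : Int) (ht : 2 < t) :
    (∀ d : Int, 2 ≤ d → d ≤ PySem.Int.floordiv t 2 → ¬ d ∣ t) ↔ Nat.Prime t.toNat := by
  obtain ⟨n, rfl⟩ : ∃ n : Nat, t = (n : Int) := ⟨t.toNat, by omega⟩
  have h3 : 3 ≤ n := by omega
  simp only [Int.toNat_natCast]
  constructor
  · intro H
    rw [Nat.prime_def_lt]
    refine ⟨by omega, fun m hmlt hmdvd => ?_⟩
    by_contra hm1
    have hm0 : m ≠ 0 := by rintro rfl; simp at hmdvd; omega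
    have hm2 : 2 ≤ m := by omega
    obtain ⟨c, hc⟩ := hmdvd
    have hc2 : 2 ≤ c := by
      rcases Nat.lt_or_ge c 2 with h | h
      · interval_cases c <;> omega
      · exact h
    have hhalf : m ≤ n / 2 := by
      rw [Nat.le_div_iff_mul_le (by norm_num)]
      nlinarith
    have hfd : PySem.Int.floordiv ((n:Int)) 2 = ((n/2 : Nat) : Int) := by
      exact_mod_cast PySem.Int.floordiv_natCast n 2
    refine H (m : Int) (by exact_mod_cast hm2) ?_ (by exact_mod_cast Int.natCast_dvd_natCast.mpr ⟨c, hc⟩)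
    rw [hfd]
    exact_mod_cast hhalf
  · intro hp d h2 hhalf hdvd
    have hd0 : 0 ≤ d := by omega
    obtain ⟨m, rfl⟩ : ∃ m : Nat, d = (m : Int) := ⟨d.toNat, by omega⟩
    have hmdvd : m ∣ n := Int.natCast_dvd_natCast.mp hdvd
    rcases hp.eq_one_or_self_of_dvd m hmdvd with h | h
    · omega
    · rw [h] at h2 hhalf
      have hfd : PySem.Int.floordiv ((n:Int)) 2 = ((n/2 : Nat) : Int) := by
        exact_mod_cast PySem.Int.floordiv_natCast n 2
      rw [hfd] at hhalf
      have : n / 2 < n := Nat.div_lt_self (by omega) (by norm_num)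
      omega

lemma divB_iff_prime (t : Int) (ht : 2 < t) (hodd : ¬ (2:Int) ∣ t) :
    (∀ k : Nat, (3 + 2 * (k:Int)) * (3 + 2 * (k:Int)) ≤ t → ¬ (3 + 2 * (k:Int)) ∣ t) ↔
      Nat.Prime t.toNat := by
  obtain ⟨n, rfl⟩ : ∃ n : Nat, t = (n : Int) := ⟨t.toNat, by omega⟩
  have h3 : 3 ≤ n := by omega
  simp only [Int.toNat_natCast]
  constructor
  · intro H
    by_contra hnp
    set p := n.minFac with hp
    have hpp : Nat.Prime p := Nat.minFac_prime (by omega)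
    have hpd : p ∣ n := Nat.minFac_dvd n
    have hsq : p * p ≤ n := by
      have := Nat.minFac_sq_le_self (by omega : 0 < n) hnp
      nlinarith [this]
    have hp2 : p ≠ 2 := by
      rintro h
      exact hodd (by exact_mod_cast Int.natCast_dvd_natCast.mpr (h ▸ hpd))
    obtain ⟨j, hj⟩ := hpp.odd_of_ne_two hp2
    have hp3 : 3 ≤ p := by have := hpp.two_le; omega
    obtain ⟨k, hk⟩ : ∃ k : Nat, p = 3 + 2 * k := ⟨(p - 3) / 2, by omega⟩
    refine H k ?_ ?_
    · nlinarith
    · rw [show (3:Int) + 2 * k = (p:Int) by rw [hk]; push_cast; ring]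
      exact_mod_cast Int.natCast_dvd_natCast.mpr hpd
  · intro hp k hk hdvd
    set m : Nat := 3 + 2 * k with hm
    have hdvd' : m ∣ n := by
      apply Int.natCast_dvd_natCast.mp
      push_cast [hm]
      convert hdvd using 2
    rcases hp.eq_one_or_self_of_dvd m hdvd' with h | h
    · omega
    · have hk' : (m : Int) * m ≤ n := by push_cast [hm]; convert hk using 2
      have : (n : Int) * n ≤ n := by rw [← h] at hk' ⊢; exact_mod_cast hk'
      nlinarith [this, (by exact_mod_cast h3 : (3:Int) ≤ (n:Int))]

lemma acheck_eq_isCounted (t : Int) : acheckB t = isCounted t := by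
  rw [Bool.eq_iff_iff]
  by_cases ht : 2 < t
  · have hA : acheckB t = true ↔
        (∀ d : Int, 2 ≤ d → d ≤ PySem.Int.floordiv t 2 → ¬ d ∣ t) := by
      simp only [acheckB, Bool.and_eq_true, decide_eq_true_eq, List.all_eq_true,
        PySem.List.mem_pyRange_one, Bool.not_eq_eq_eq_not, Bool.not_true, beq_eq_false_iff_ne]
      constructor
      · rintro ⟨-, h⟩ d h2 hle
        rw [← PySem.Int.mod_eq_zero_iff_dvd]
        exact h d ⟨h2, by omega⟩
      · intro h
        refine ⟨ht, fun d ⟨h2, hlt⟩ => ?_⟩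
        rw [Ne, PySem.Int.mod_eq_zero_iff_dvd]
        exact h d h2 (by omega)
    rw [hA, divA_iff_prime t ht]
    by_cases he : (2:Int) ∣ t
    · have hic : isCounted t = false := by
        have h2 : t % 2 = 0 := Int.emod_eq_zero_of_dvd he
        simp [isCounted, h2]
      rw [hic]
      simp only [Bool.false_eq_true, iff_false]
      intro hp
      obtain ⟨n, rfl⟩ : ∃ n : Nat, t = (n : Int) := ⟨t.toNat, by omega⟩
      simp only [Int.toNat_natCast] at hp
      have h2n : 2 ∣ n := by exact_mod_cast he
      rcases hp.eq_one_or_self_of_dvd 2 h2n with h | h <;> omega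
    · have hic : isCounted t = trialOdd t 3 := by
        have h2 : t % 2 ≠ 0 := fun h => he (Int.dvd_of_emod_eq_zero h)
        simp [isCounted, h2, show ¬ t ≤ 2 by omega]
      rw [hic, trialOdd_iff t (t + 1 - 3).toNat 3 le_rfl (by norm_num)]
      have hB := divB_iff_prime t ht he
      simp only [Ne, PySem.Int.mod_eq_zero_iff_dvd]
      exact hB.symm
  · constructor
    · intro h
      exfalso
      simp only [acheckB, Bool.and_eq_true, decide_eq_true_eq] at h
      exact ht h.1
    · intro h
      exfalso
      have : isCounted t = false := by simp [isCounted]; omega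
      rw [this] at h
      exact absurd h (by simp)

-- ===== A as an S-chain =====

lemma body_eq_contrib (t ans : Int) :
    (if t > 2 then
      if findDiv t 2 (PySem.Int.floordiv t 2 + 1) then ans else ans + 1
     else ans) = ans + contrib t := by
  unfold contrib acheckB
  rw [findDiv_eq t (PySem.Int.floordiv t 2 + 1 - 2).toNat 2 _ le_rfl]
  by_cases h1 : t > 2
  · rw [if_pos h1, decide_eq_true h1, Bool.true_and]
    cases hall : (PySem.List.pyRange 2 (PySem.Int.floordiv t 2 + 1) 1).all
        (fun d => !(PySem.Int.mod t d == 0))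
    · rw [Bool.not_false, if_pos rfl, if_neg (by simp)]; omega
    · rw [Bool.not_true, if_neg (by simp), if_pos rfl]
  · rw [if_neg h1, decide_eq_false h1, Bool.false_and, if_neg (by simp)]
    omega

lemma lvl1 (nums : List Int) (s : Int) :
    ∀ (a ans : Int), 0 ≤ a →
      (PySem.List.pyRange a (nums.length : Int) 1).foldl (fun answer k =>
        let temp := s + PySem.List.pyGetD nums k 0
        if temp > 2 then
          if findDiv temp 2 (PySem.Int.floordiv temp 2 + 1) then answer else answer + 1
        else answer) ans
      = ans + S (fun z _ => contrib (s + z)) (nums.drop a.toNat) := by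
  intro a ans ha
  rw [PySem.List.foldl_congr_mem _ _
    (fun answer k => answer + contrib (s + PySem.List.pyGetD nums k 0)) ans
    (fun acc x _ => body_eq_contrib _ acc)]
  rw [PySem.List.foldl_add]
  congr 1
  have := sum_pyRange_suffix nums (fun z _ => contrib (s + z))
    ((nums.length : Int) - a).toNat a ha le_rfl
  simpa using this

lemma lvl2 (nums : List Int) (x : Int) :
    ∀ (a ans : Int), 0 ≤ a →
      (PySem.List.pyRange a (nums.length : Int) 1).foldl (fun answer j =>
        (PySem.List.pyRange (j + 1) (nums.length : Int) 1).foldl (fun answer k =>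
          let temp := x + PySem.List.pyGetD nums j 0 + PySem.List.pyGetD nums k 0
          if temp > 2 then
            if findDiv temp 2 (PySem.Int.floordiv temp 2 + 1) then answer else answer + 1
          else answer) answer) ans
      = ans + S (fun y r => S (fun z _ => contrib (x + y + z)) r) (nums.drop a.toNat) := by
  intro a ans ha
  rw [PySem.List.foldl_congr_mem _ _
    (fun answer j => answer +
      S (fun z _ => contrib (x + PySem.List.pyGetD nums j 0 + z)) (nums.drop (j.toNat + 1))) ans
    (fun acc j hj => by
      have hj0 : 0 ≤ j := le_trans ha (PySem.List.mem_pyRange_one.mp hj).1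
      have h1 : (j + 1).toNat = j.toNat + 1 := by omega
      have := lvl1 nums (x + PySem.List.pyGetD nums j 0) (j + 1) acc (by omega)
      rw [h1] at this
      exact this)]
  rw [PySem.List.foldl_add]
  congr 1
  have := sum_pyRange_suffix nums
    (fun y r => S (fun z _ => contrib (x + y + z)) r)
    ((nums.length : Int) - a).toNat a ha le_rfl
  simpa using this

lemma solution_as_S (nums : List Int) :
    solution nums
      = S (fun x r => S (fun y r' => S (fun z _ => contrib (x + y + z)) r') r) nums := by
  unfold solution
  rw [PySem.List.foldl_congr_mem _ _
    (fun answer i => answer +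
      S (fun y r => S (fun z _ => contrib (PySem.List.pyGetD nums i 0 + y + z)) r)
        (nums.drop (i.toNat + 1))) 0
    (fun acc i hi => by
      have hi0 : 0 ≤ i := (PySem.List.mem_pyRange_one.mp hi).1
      have h1 : (i + 1).toNat = i.toNat + 1 := by omega
      have := lvl2 nums (PySem.List.pyGetD nums i 0) (i + 1) acc (by omega)
      rw [h1] at this
      exact this)]
  rw [PySem.List.foldl_add]
  have := sum_pyRange_suffix nums
    (fun x r => S (fun y r' => S (fun z _ => contrib (x + y + z)) r') r)
    nums.length 0 le_rfl (by omega)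
  simpa using this

-- ===== B as an S-chain =====

lemma countK_succ (k : Nat) (s : Int) (xs : List Int) :
    countK (k + 1) s xs = S (fun x r => countK k (s + x) r) xs := by
  show (PySem.List.enumerate xs).foldl
      (fun total p => total + countK k (s + p.2) (PySem.List.slice xs (some (p.1 + 1)) none)) 0
    = S (fun x r => countK k (s + x) r) xs
  rw [PySem.List.foldl_add, PySem.List.enumerate_eq_map_pyRange xs 0, List.map_map]
  rw [List.map_congr_left (fun j hj => by
    have hj0 : 0 ≤ j := (PySem.List.mem_pyRange_one.mp hj).1
    show countK k (s + PySem.List.pyGetD xs j 0) (PySem.List.slice xs (some (j + 1)) none)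
      = countK k (s + PySem.List.pyGetD xs j 0) (xs.drop (j.toNat + 1))
    rw [PySem.List.slice_from xs (by omega : (0:Int) ≤ j + 1),
      show (j + 1).toNat = j.toNat + 1 by omega])]
  have := sum_pyRange_suffix xs (fun x r => countK k (s + x) r) xs.length 0 le_rfl (by omega)
  simpa using this

-- ===== VERDICT (by name: the statement is the Claim_ definition above) =====
theorem solution_spec : Claim_equal_solution := by
  intro nums _
  unfold Spec_solution solution_alt
  rw [solution_as_S]
  rw [countK_succ]
  refine S_congr _ _ (fun x r => ?_) nums
  rw [countK_succ]
  refine S_congr _ _ (fun y r' => ?_) r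
  rw [countK_succ]
  refine S_congr _ _ (fun z r'' => ?_) r'
  show contrib (x + y + z) = countK 0 ((0 + x + y) + z) r''
  simp [countK, contrib, acheck_eq_isCounted]
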